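-- pv_equiv track=rewrite | github.com/AdventCode21/advent | lida/day22/d22.py | execute1
-- ===== SOURCE A (Python) =====
-- import itertools
--
-- def execute1(steps):
--     cubes = set()
--
--     for step in steps:
--         a = [step[1], step[2], step[3]]
--         coordinates = set(itertools.product(*a))
--         if step[0]:
--             cubes = cubes.union(coordinates)
--         else:
--             cubes = cubes.difference(coordinates)
--
--     return len(cubes)
-- ===== SOURCE B (Python) =====
-- import itertools
--
-- def execute1(steps):
--     # One reverse pass: the LAST step covering a cube decides its state, so walking
--     # the steps backwards the FIRST covering step decides; count each 'on' decision once.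
--     seen = set()
--     count = 0
--     for on, xs, ys, zs in reversed(steps):
--         for t in itertools.product(xs, ys, zs):
--             if t not in seen:
--                 seen.add(t)
--                 if on:
--                     count += 1
--     return count
-- ===== Notes on version B (the rewrite author's own statement) =====
-- stated objective: alternative
-- what changed: B replaces A's forward pass that rebuilds the lit-cube set with a set union/difference per step by a single reverse pass in which the first step covering a cube decides its state once, counting 'on' decisions directly instead of maintaining the lit set.
import Mathlib
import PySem

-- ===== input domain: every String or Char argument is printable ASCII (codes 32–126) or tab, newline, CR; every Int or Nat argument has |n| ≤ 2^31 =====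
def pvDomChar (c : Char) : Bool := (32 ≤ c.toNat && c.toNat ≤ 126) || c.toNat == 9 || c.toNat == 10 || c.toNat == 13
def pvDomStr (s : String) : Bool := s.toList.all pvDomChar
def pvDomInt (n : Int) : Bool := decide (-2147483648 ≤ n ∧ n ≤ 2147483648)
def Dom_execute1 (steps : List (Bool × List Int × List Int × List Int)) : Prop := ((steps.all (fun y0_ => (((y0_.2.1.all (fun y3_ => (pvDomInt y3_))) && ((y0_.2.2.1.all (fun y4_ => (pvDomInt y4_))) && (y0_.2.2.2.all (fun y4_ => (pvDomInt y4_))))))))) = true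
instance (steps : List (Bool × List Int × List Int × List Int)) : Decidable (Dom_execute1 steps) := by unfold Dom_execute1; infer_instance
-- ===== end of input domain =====

-- B replaces A's forward pass of per-step set union/difference rebuilds by ONE reverse
-- pass in which the first covering step decides each cube once (alternative algorithm;
-- same asymptotic cost).

-- ===== PORT A =====
-- itertools.product(xs, ys, zs): all triples in nested order (shared library helper).
def pvProduct (xs ys zs : List Int) : List (Int × Int × Int) :=
  xs.flatMap (fun x => ys.flatMap (fun y => zs.map (fun z => (x, y, z))))

-- loop body of A: coordinates = set(product(*a)); union or difference
def pvAStep (cubes : PySem.Set (Int × Int × Int))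
    (step : Bool × List Int × List Int × List Int) : PySem.Set (Int × Int × Int) :=
  let coordinates := PySem.Set.ofList (pvProduct step.2.1 step.2.2.1 step.2.2.2)
  if step.1 then PySem.Set.union cubes coordinates
  else PySem.Set.diff cubes coordinates

def execute1 (steps : List (Bool × List Int × List Int × List Int)) : Int :=
  PySem.Set.len (steps.foldl pvAStep PySem.Set.empty)

-- ===== PORT B =====
-- inner loop body of B: if t not in seen: seen.add(t); if on: count += 1
def pvAltStep (on : Bool) (st : PySem.Set (Int × Int × Int) × Int)
    (t : Int × Int × Int) : PySem.Set (Int × Int × Int) × Int :=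
  if PySem.Set.contains st.1 t then st
  else (PySem.Set.add st.1 t, if on then st.2 + 1 else st.2)

-- outer loop body of B: one step of the reverse pass
def pvBStep (st : PySem.Set (Int × Int × Int) × Int)
    (step : Bool × List Int × List Int × List Int) : PySem.Set (Int × Int × Int) × Int :=
  (pvProduct step.2.1 step.2.2.1 step.2.2.2).foldl (pvAltStep step.1) st

def execute1_alt (steps : List (Bool × List Int × List Int × List Int)) : Int :=
  (steps.reverse.foldl pvBStep (PySem.Set.empty, 0)).2

-- ===== PRECONDITION & SPEC =====
def Spec_execute1 (steps : List (Bool × List Int × List Int × List Int)) (out : Int) : Prop := out = execute1_alt steps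
instance (steps : List (Bool × List Int × List Int × List Int)) (out : Int) : Decidable (Spec_execute1 steps out) := by unfold Spec_execute1; infer_instance

-- ===== CLAIM (what is proved, stated in full; the proofs are below) =====
def Claim_equal_execute1 : Prop := ∀ (steps : List (Bool × List Int × List Int × List Int)), Dom_execute1 steps → Spec_execute1 steps (execute1 steps)

-- ===== LEMMAS AND PROOFS =====

-- the triple list produced by a step
def pvP (s : Bool × List Int × List Int × List Int) : List (Int × Int × Int) :=
  pvProduct s.2.1 s.2.2.1 s.2.2.2

-- "the first step of M covering t says on" (= last step of the original order)
def pvLit : List (Bool × List Int × List Int × List Int) → (Int × Int × Int) → Bool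
  | [], _ => false
  | s :: M, t => if t ∈ pvP s then s.1 else pvLit M t

theorem pvLit_append (Q : List (Bool × List Int × List Int × List Int))
    (s : Bool × List Int × List Int × List Int) (t : Int × Int × Int) :
    pvLit (Q ++ [s]) t =
      if ∃ u ∈ Q, t ∈ pvP u then pvLit Q t else (if t ∈ pvP s then s.1 else false) := by
  induction Q with
  | nil => simp [pvLit]
  | cons q Q ih =>
    by_cases hq : t ∈ pvP q
    · simp [pvLit, hq]
    · by_cases hQ : ∃ u ∈ Q, t ∈ pvP u
      · simp [pvLit, hq, ih, hQ]
      · have : ¬ ∃ u ∈ q :: Q, t ∈ pvP u := by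
          simp only [List.mem_cons]
          rintro ⟨u, hu | hu, hm⟩
          · exact hq (hu ▸ hm)
          · exact hQ ⟨u, hu, hm⟩
        simp [pvLit, hq, ih, hQ]

theorem pvAfold_char (L : List (Bool × List Int × List Int × List Int)) :
    ∀ (c : PySem.Set (Int × Int × Int)), c.Nodup →
      (L.foldl pvAStep c).Nodup ∧
      ∀ t, t ∈ L.foldl pvAStep c ↔
        (if ∃ u ∈ L, t ∈ pvP u then pvLit L.reverse t = true else t ∈ c) := by
  induction L with
  | nil => intro c hc; simp [hc]
  | cons s L ih =>
    intro c hc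
    have hnd : (pvAStep c s).Nodup := by
      unfold pvAStep
      by_cases h : s.1 <;>
        simp [h, PySem.Set.nodup_union, PySem.Set.nodup_diff, hc]
    have hmem : ∀ t, t ∈ pvAStep c s ↔
        (if s.1 then t ∈ c ∨ t ∈ pvP s else t ∈ c ∧ t ∉ pvP s) := by
      intro t
      unfold pvAStep
      by_cases h : s.1 <;>
        simp [h, PySem.Set.mem_union, PySem.Set.mem_diff, PySem.Set.mem_ofList, pvP]
    obtain ⟨ihnd, ihmem⟩ := ih (pvAStep c s) hnd
    refine ⟨by simpa using ihnd, ?_⟩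
    intro t
    have hrev : (s :: L).reverse = L.reverse ++ [s] := by simp
    rw [List.foldl_cons, ihmem t, hrev, pvLit_append]
    have hcov : (∃ u ∈ L.reverse, t ∈ pvP u) ↔ (∃ u ∈ L, t ∈ pvP u) := by simp
    by_cases hL : ∃ u ∈ L, t ∈ pvP u
    · simp [hL]
    · by_cases hs : t ∈ pvP s
      · have hcons : ∃ u ∈ s :: L, t ∈ pvP u := ⟨s, List.mem_cons_self, hs⟩
        simp [hL, hs, hmem t]
      · have _hcons : ¬ ∃ u ∈ s :: L, t ∈ pvP u := by
          simp only [List.mem_cons]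
          rintro ⟨u, hu | hu, hm⟩
          · exact hs (hu ▸ hm)
          · exact hL ⟨u, hu, hm⟩
        simp [hL, hs, hmem t]

theorem pvInner (on : Bool) (l : List (Int × Int × Int)) :
    ∀ (seen : PySem.Set (Int × Int × Int)) (count : Int), seen.Nodup →
      l.foldl (pvAltStep on) (seen, count) =
        (PySem.Set.update seen l,
         count + (if on then ((PySem.Set.update seen l).length : Int) - seen.length else 0)) := by
  induction l with
  | nil =>
    intro seen count h
    simp [PySem.Set.update]
  | cons t l ih =>
    intro seen count h
    by_cases hc : t ∈ seen
    · have hct : PySem.Set.contains seen t = true := (PySem.Set.contains_iff _ _).mpr hc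
      have hup : PySem.Set.update seen (t :: l) = PySem.Set.update seen l := by
        rw [PySem.Set.update_cons, PySem.Set.add_of_mem hc]
      rw [List.foldl_cons]
      show l.foldl (pvAltStep on) (pvAltStep on (seen, count) t) = _
      rw [show pvAltStep on (seen, count) t = (seen, count) by
        simp [pvAltStep, hc]]
      rw [ih seen count h, hup]
    · have hct : ¬ PySem.Set.contains seen t = true := by
        simp [hc]
      have hadd : PySem.Set.add seen t = seen ++ [t] := PySem.Set.add_of_not_mem hc
      have hnd : (seen ++ [t]).Nodup := by
        rw [← hadd]; exact PySem.Set.nodup_add _ _ h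
      have hup : PySem.Set.update seen (t :: l) = PySem.Set.update (seen ++ [t]) l := by
        rw [PySem.Set.update_cons, hadd]
      rw [List.foldl_cons]
      show l.foldl (pvAltStep on) (pvAltStep on (seen, count) t) = _
      rw [show pvAltStep on (seen, count) t
            = (seen ++ [t], if on then count + 1 else count) by
        simp [pvAltStep, hc]]
      rw [ih (seen ++ [t]) _ hnd, hup]
      refine Prod.ext rfl ?_
      by_cases hon : on
      · simp only [hon, if_true, List.length_append, List.length_cons, List.length_nil]; push_cast; ring
      · simp [hon]

theorem pvOuter (Q : List (Bool × List Int × List Int × List Int)) :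
    (Q.foldl pvBStep (PySem.Set.empty, 0)).1.Nodup ∧
    (∀ t, t ∈ (Q.foldl pvBStep (PySem.Set.empty, 0)).1 ↔ ∃ u ∈ Q, t ∈ pvP u) ∧
    (Q.foldl pvBStep (PySem.Set.empty, 0)).2 =
      (((Q.foldl pvBStep (PySem.Set.empty, 0)).1.filter (fun t => pvLit Q t)).length : Int) := by
  induction Q using List.reverseRecOn with
  | nil => simp [PySem.Set.empty]
  | append_singleton Q s ih =>
    obtain ⟨ihnd, ihmem, ihcnt⟩ := ih
    rw [List.foldl_append]
    simp only [List.foldl_cons, List.foldl_nil]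
    set st := Q.foldl pvBStep (PySem.Set.empty, 0) with hst
    have hg : pvBStep st s =
        (PySem.Set.update st.1 (pvP s),
         st.2 + (if s.1 then ((PySem.Set.update st.1 (pvP s)).length : Int) - st.1.length
                 else 0)) := by
      show (pvP s).foldl (pvAltStep s.1) st = _
      rw [show st = (st.1, st.2) from rfl]
      exact pvInner s.1 (pvP s) st.1 st.2 ihnd
    rw [hg]
    have hnew := PySem.Set.update_eq_append_filter st.1 (pvP s)
    set new := (PySem.Set.ofList (pvP s)).filter (fun y => !(PySem.Set.contains st.1 y))
      with hnewdef
    refine ⟨PySem.Set.nodup_update _ _ ihnd, ?_, ?_⟩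
    · intro t
      rw [PySem.Set.mem_update, ihmem t]
      constructor
      · rintro (⟨u, hu, hm⟩ | hm)
        · exact ⟨u, List.mem_append.mpr (Or.inl hu), hm⟩
        · exact ⟨s, List.mem_append.mpr (Or.inr (List.mem_singleton.mpr rfl)), hm⟩
      · rintro ⟨u, hu, hm⟩
        rcases List.mem_append.mp hu with hu | hu
        · exact Or.inl ⟨u, hu, hm⟩
        · exact Or.inr (by rw [← List.mem_singleton.mp hu]; exact hm)
    · -- count
      have hfold : PySem.Set.update st.1 (pvP s) = st.1 ++ new := hnew
      have hseenfilter :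
          st.1.filter (fun t => pvLit (Q ++ [s]) t) = st.1.filter (fun t => pvLit Q t) := by
        apply List.filter_congr
        intro t ht
        have hcov : ∃ u ∈ Q, t ∈ pvP u := (ihmem t).mp ht
        simp [pvLit_append, hcov]
      have hnewfilter :
          new.filter (fun t => pvLit (Q ++ [s]) t) = if s.1 then new else [] := by
        by_cases h1 : s.1
        · simp only [h1, if_true]
          apply List.filter_eq_self.mpr
          intro t ht
          have ht' : t ∈ PySem.Set.ofList (pvP s) ∧ ¬ PySem.Set.contains st.1 t = true := by
            simpa [hnewdef] using (List.mem_filter.mp ht)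
          have hmem : t ∈ pvP s := (PySem.Set.mem_ofList _ _).mp ht'.1
          have hnotc : ¬ ∃ u ∈ Q, t ∈ pvP u := by
            intro hcov
            exact ht'.2 ((PySem.Set.contains_iff _ _).mpr ((ihmem t).mpr hcov))
          simp [pvLit_append, hnotc, hmem, h1]
        · simp only [h1]
          apply List.filter_eq_nil_iff.mpr
          intro t ht
          have ht' : t ∈ PySem.Set.ofList (pvP s) ∧ ¬ PySem.Set.contains st.1 t = true := by
            simpa [hnewdef] using (List.mem_filter.mp ht)
          have hmem : t ∈ pvP s := (PySem.Set.mem_ofList _ _).mp ht'.1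
          have hnotc : ¬ ∃ u ∈ Q, t ∈ pvP u := by
            intro hcov
            exact ht'.2 ((PySem.Set.contains_iff _ _).mpr ((ihmem t).mpr hcov))
          simp [pvLit_append, hnotc, hmem, h1]
      rw [hfold, List.filter_append, hseenfilter, hnewfilter, List.length_append]
      by_cases h1 : s.1
      · simp only [h1, if_true]
        rw [ihcnt, List.length_append]
        push_cast
        ring
      · simp only [h1]
        rw [ihcnt]
        simp

-- ===== VERDICT (by name: the statement is the Claim_ definition above) =====
theorem execute1_spec : Claim_equal_execute1 := by
  unfold Claim_equal_execute1
  intro steps _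
  unfold Spec_execute1
  unfold execute1 execute1_alt
  obtain ⟨haNd, haMem⟩ := pvAfold_char steps PySem.Set.empty (by simp [PySem.Set.empty])
  obtain ⟨hbNd, hbMem, hbCnt⟩ := pvOuter steps.reverse
  rw [hbCnt]
  have hperm :
      (steps.foldl pvAStep PySem.Set.empty).Perm
        ((steps.reverse.foldl pvBStep (PySem.Set.empty, 0)).1.filter
          (fun t => pvLit steps.reverse t)) := by
    apply (List.perm_ext_iff_of_nodup haNd (hbNd.filter _)).mpr
    intro t
    rw [haMem t, List.mem_filter]
    rw [hbMem t]
    have hcov : (∃ u ∈ steps.reverse, t ∈ pvP u) ↔ (∃ u ∈ steps, t ∈ pvP u) := by simp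
    by_cases hc : ∃ u ∈ steps, t ∈ pvP u
    · simp [hc]
    · simp [hc]
  rw [PySem.Set.len, hperm.length_eq]
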